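-- pv_equiv track=rewrite | github.com/youssefshibl/Data-Structures-and-Algorithms-Specialization-San-Diego | Algorithmic-Toolbox/test2.py | primitive_calculator
-- ===== SOURCE A (Python) =====
-- def primitive_calculator(n):
--     # Create a list to store the minimum number of steps required to reach each number from 1 to n
--     steps = [0] * (n + 1)
--
--     # Create a list to store the values of each step
--     values = [[] for _ in range(n + 1)]
--
--     for i in range(1, n + 1):
--         # Start by adding 1 to the current number
--         steps[i] = steps[i - 1] + 1
--         values[i] = values[i - 1] + [i]
--
--         # If the current number is divisible by 2, check if we can reach it with fewer steps by multiplying by 2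
--         if i % 2 == 0 and steps[i // 2] + 1 < steps[i]:
--             steps[i] = steps[i // 2] + 1
--             values[i] = values[i // 2] + [i]
--
--         # If the current number is divisible by 3, check if we can reach it with fewer steps by multiplying by 3
--         if i % 3 == 0 and steps[i // 3] + 1 < steps[i]:
--             steps[i] = steps[i // 3] + 1
--             values[i] = values[i // 3] + [i]
--
--     # Return both the minimum number of steps required to reach n and the values of each step
--     return steps[n], values[n]
-- ===== SOURCE B (Python) =====
-- def primitive_calculator(n):
--     # O(n) DP: store one parent pointer per value, reconstruct the path once.
--     steps = [0] * (n + 1)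
--     parent = [0] * (n + 1)
--     for i in range(1, n + 1):
--         s, p = steps[i - 1] + 1, i - 1
--         if i % 2 == 0 and steps[i // 2] + 1 < s:
--             s, p = steps[i // 2] + 1, i // 2
--         if i % 3 == 0 and steps[i // 3] + 1 < s:
--             s, p = steps[i // 3] + 1, i // 3
--         steps[i], parent[i] = s, p
--     path = []
--     cur = n
--     while cur > 0:
--         path.append(cur)
--         cur = parent[cur]
--     path.reverse()
--     return steps[n], path
-- ===== Notes on version B (the rewrite author's own statement) =====
-- stated objective: faster
-- what changed: Instead of storing a full copy of the optimal path at every index i (quadratic-size values table built by list concatenation), B stores one parent pointer per index and reconstructs the single path for n once at the end.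
import Mathlib
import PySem

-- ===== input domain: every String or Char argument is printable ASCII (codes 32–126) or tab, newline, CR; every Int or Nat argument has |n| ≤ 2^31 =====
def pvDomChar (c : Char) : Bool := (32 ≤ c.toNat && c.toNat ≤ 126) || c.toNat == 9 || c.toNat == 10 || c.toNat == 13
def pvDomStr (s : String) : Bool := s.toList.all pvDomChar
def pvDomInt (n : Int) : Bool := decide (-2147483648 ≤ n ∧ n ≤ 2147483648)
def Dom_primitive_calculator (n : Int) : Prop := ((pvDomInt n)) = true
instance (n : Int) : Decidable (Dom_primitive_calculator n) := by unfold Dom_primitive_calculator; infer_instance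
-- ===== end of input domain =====

-- B replaces A's per-index path copies with one parent pointer per index and a single
-- final path reconstruction; equal return value proved for all n ≥ 0.

-- ===== PORT A =====
-- one iteration of A's for-loop: state = (steps, values), loop index i
def pcStepA (sv : Array Int × Array (List Int)) (i : Nat) : Array Int × Array (List Int) :=
  let sv := (sv.1.setIfInBounds i (sv.1[i-1]! + 1),
             sv.2.setIfInBounds i (sv.2[i-1]! ++ [(i : Int)]))
  let sv := if i % 2 = 0 ∧ sv.1[i/2]! + 1 < sv.1[i]! then
      (sv.1.setIfInBounds i (sv.1[i/2]! + 1), sv.2.setIfInBounds i (sv.2[i/2]! ++ [(i : Int)]))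
    else sv
  if i % 3 = 0 ∧ sv.1[i/3]! + 1 < sv.1[i]! then
    (sv.1.setIfInBounds i (sv.1[i/3]! + 1), sv.2.setIfInBounds i (sv.2[i/3]! ++ [(i : Int)]))
  else sv

def primitive_calculator (n : Int) : Int × List Int :=
  let m := n.toNat
  let sv := (List.range' 1 m).foldl pcStepA
    (Array.replicate (m+1) 0, Array.replicate (m+1) ([] : List Int))
  (sv.1[m]!, sv.2[m]!)

-- ===== PORT B =====
-- one iteration of B's for-loop: state = (steps, parent), loop index i
def pcStepB (sp : Array Int × Array Nat) (i : Nat) : Array Int × Array Nat :=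
  let c : Int × Nat := (sp.1[i-1]! + 1, i - 1)
  let c := if i % 2 = 0 ∧ sp.1[i/2]! + 1 < c.1 then (sp.1[i/2]! + 1, i/2) else c
  let c := if i % 3 = 0 ∧ sp.1[i/3]! + 1 < c.1 then (sp.1[i/3]! + 1, i/3) else c
  (sp.1.setIfInBounds i c.1, sp.2.setIfInBounds i c.2)

-- B's 'while cur > 0' loop (fuel only makes the while-loop total as a Lean function)
def pcCollect (parent : Array Nat) : Nat → Nat → List Int
  | 0, _ => []
  | fuel+1, cur => if 0 < cur then (cur : Int) :: pcCollect parent fuel (parent[cur]!) else []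

def primitive_calculator_alt (n : Int) : Int × List Int :=
  let m := n.toNat
  let sp := (List.range' 1 m).foldl pcStepB
    (Array.replicate (m+1) 0, Array.replicate (m+1) 0)
  (sp.1[m]!, (pcCollect sp.2 (m+1) m).reverse)

-- ===== PRECONDITION & SPEC =====
-- A raises IndexError on negative inputs (indexing a too-short list); B raises there too.
def Pre_primitive_calculator (n : Int) : Prop := 0 ≤ n
instance (n : Int) : Decidable (Pre_primitive_calculator n) := by unfold Pre_primitive_calculator; infer_instance
def pvWitness_primitive_calculator : Int := 10

def Spec_primitive_calculator (n : Int) (out : Int × List Int) : Prop := out = primitive_calculator_alt n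
instance (n : Int) (out : Int × List Int) : Decidable (Spec_primitive_calculator n out) := by unfold Spec_primitive_calculator; infer_instance

-- ===== CLAIM (what is proved, stated in full; the proofs are below) =====
def Claim_equal_primitive_calculator : Prop := ∀ (n : Int), Dom_primitive_calculator n → Pre_primitive_calculator n → Spec_primitive_calculator n (primitive_calculator n)

-- ===== LEMMAS AND PROOFS =====

-- pure specification of DP cell i: (min steps to reach i, chosen predecessor)
def pcSP : Nat → Int × Nat
  | 0 => (0, 0)
  | (i+1) =>
    let c : Int × Nat := ((pcSP i).1 + 1, i)
    let c := if (i+1) % 2 = 0 ∧ (pcSP ((i+1)/2)).1 + 1 < c.1 then ((pcSP ((i+1)/2)).1 + 1, (i+1)/2) else c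
    if (i+1) % 3 = 0 ∧ (pcSP ((i+1)/3)).1 + 1 < c.1 then ((pcSP ((i+1)/3)).1 + 1, (i+1)/3) else c
  decreasing_by all_goals omega

lemma pcSP_parent_le (i : Nat) : (pcSP (i+1)).2 ≤ i := by
  rw [pcSP]
  dsimp only
  split_ifs <;> simp <;> omega

-- the optimal path to i along pcSP's parent pointers
def pcPath : Nat → List Int
  | 0 => []
  | (i+1) => pcPath (pcSP (i+1)).2 ++ [((i+1 : Nat) : Int)]
  decreasing_by exact Nat.lt_succ_of_le (pcSP_parent_le i)

lemma getElem!_setIfInBounds {α : Type} [Inhabited α] (a : Array α) (i j : Nat) (v : α) :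
    (a.setIfInBounds i v)[j]! = if i = j ∧ j < a.size then v else a[j]! := by
  simp only [Array.getElem!_eq_getD, Array.getD]
  rcases Nat.lt_or_ge j a.size with hj | hj
  · rcases eq_or_ne i j with rfl | hne
    · simp [hj]
    · simp [hj, hne]
  · simp [Nat.not_lt.mpr hj]

lemma read_set_self {α : Type} [Inhabited α] (a : Array α) (i : Nat) (v : α) (h : i < a.size) :
    (a.setIfInBounds i v)[i]! = v := by
  rw [getElem!_setIfInBounds]; simp [h]

lemma read_set_other {α : Type} [Inhabited α] (a : Array α) (i j : Nat) (v : α) (h : i ≠ j) :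
    (a.setIfInBounds i v)[j]! = a[j]! := by
  rw [getElem!_setIfInBounds]; simp [h]

-- invariant for A's fold
def InvA (m k : Nat) (sv : Array Int × Array (List Int)) : Prop :=
  sv.1.size = m + 1 ∧ sv.2.size = m + 1 ∧
  (∀ j, j ≤ k → j ≤ m → sv.1[j]! = (pcSP j).1 ∧ sv.2[j]! = pcPath j)

-- invariant for B's fold
def InvB (m k : Nat) (sp : Array Int × Array Nat) : Prop :=
  sp.1.size = m + 1 ∧ sp.2.size = m + 1 ∧
  (∀ j, j ≤ k → j ≤ m → sp.1[j]! = (pcSP j).1 ∧ sp.2[j]! = (pcSP j).2)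

lemma invA_init (m : Nat) :
    InvA m 0 (Array.replicate (m+1) 0, Array.replicate (m+1) ([] : List Int)) := by
  refine ⟨by simp, by simp, ?_⟩
  intro j hj _
  interval_cases j
  constructor <;> simp [pcSP, pcPath]

lemma invB_init (m : Nat) :
    InvB m 0 (Array.replicate (m+1) 0, Array.replicate (m+1) 0) := by
  refine ⟨by simp, by simp, ?_⟩
  intro j hj _
  interval_cases j
  constructor <;> simp [pcSP]

lemma invA_mk (m k : Nat) (a : Array Int) (b : Array (List Int)) (s : Int) (v : List Int)
    (ha : a.size = m+1) (hb : b.size = m+1) (hkm : k < m)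
    (hrest : ∀ j, j ≤ k → a[j]! = (pcSP j).1 ∧ b[j]! = pcPath j)
    (hs : s = (pcSP (k+1)).1) (hv : v = pcPath (k+1)) :
    InvA m (k+1) (a.setIfInBounds (k+1) s, b.setIfInBounds (k+1) v) := by
  refine ⟨by simp [ha], by simp [hb], ?_⟩
  intro j hj hjm
  rcases eq_or_lt_of_le hj with rfl | hjk
  · exact ⟨by rw [read_set_self _ _ _ (by omega), hs],
           by rw [read_set_self _ _ _ (by omega), hv]⟩
  · have hjne : k+1 ≠ j := by omega
    exact ⟨by rw [read_set_other _ _ _ _ hjne]; exact (hrest j (by omega)).1,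
           by rw [read_set_other _ _ _ _ hjne]; exact (hrest j (by omega)).2⟩

lemma invA_step (m k : Nat) (sv : Array Int × Array (List Int))
    (hk : k < m) (h : InvA m k sv) : InvA m (k+1) (pcStepA sv (k+1)) := by
  obtain ⟨h1, h2, h3⟩ := h
  have e1 := h3 k le_rfl (le_of_lt hk)
  have e2 := h3 ((k+1)/2) (by omega) (by omega)
  have e3 := h3 ((k+1)/3) (by omega) (by omega)
  have hs1 : k + 1 < sv.1.size := by omega
  have hs2 : k + 1 < sv.2.size := by omega
  have hne2 : k + 1 ≠ (k+1)/2 := by omega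
  have hne3 : k + 1 ≠ (k+1)/3 := by omega
  unfold pcStepA
  dsimp only
  simp only [Nat.add_sub_cancel, e1.1, e1.2, e2.1, e2.2]
  set t1 : Array Int := sv.1.setIfInBounds (k+1) ((pcSP k).1 + 1) with ht1
  set v1 : Array (List Int) := sv.2.setIfInBounds (k+1) (pcPath k ++ [((k+1:Nat) : Int)]) with hv1
  have t1size : t1.size = m + 1 := by rw [ht1]; simpa using h1
  have v1size : v1.size = m + 1 := by rw [hv1]; simpa using h2
  have rt1i : t1[k+1]! = (pcSP k).1 + 1 := by rw [ht1]; exact read_set_self _ _ _ hs1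
  have rt12 : t1[(k+1)/2]! = (pcSP ((k+1)/2)).1 := by
    rw [ht1, read_set_other _ _ _ _ hne2, e2.1]
  have rt13 : t1[(k+1)/3]! = (pcSP ((k+1)/3)).1 := by
    rw [ht1, read_set_other _ _ _ _ hne3, e3.1]
  have rv12 : v1[(k+1)/2]! = pcPath ((k+1)/2) := by
    rw [hv1, read_set_other _ _ _ _ hne2, e2.2]
  have rv13 : v1[(k+1)/3]! = pcPath ((k+1)/3) := by
    rw [hv1, read_set_other _ _ _ _ hne3, e3.2]
  have t1rest : ∀ j, j ≤ k → t1[j]! = (pcSP j).1 ∧ v1[j]! = pcPath j := by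
    intro j hj
    have hjne : k + 1 ≠ j := by omega
    have := h3 j (by omega) (by omega)
    exact ⟨by rw [ht1, read_set_other _ _ _ _ hjne, this.1],
           by rw [hv1, read_set_other _ _ _ _ hjne, this.2]⟩
  simp only [rt1i, rt12, rv12]
  have hsp : pcSP (k+1) =
      (let c : Int × Nat := ((pcSP k).1 + 1, k)
       let c := if (k+1) % 2 = 0 ∧ (pcSP ((k+1)/2)).1 + 1 < c.1 then ((pcSP ((k+1)/2)).1 + 1, (k+1)/2) else c
       if (k+1) % 3 = 0 ∧ (pcSP ((k+1)/3)).1 + 1 < c.1 then ((pcSP ((k+1)/3)).1 + 1, (k+1)/3) else c) := by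
    rw [pcSP]
  by_cases c2 : (k+1) % 2 = 0 ∧ (pcSP ((k+1)/2)).1 + 1 < (pcSP k).1 + 1
  · rw [if_pos c2]
    dsimp only
    set t2 : Array Int := t1.setIfInBounds (k+1) ((pcSP ((k+1)/2)).1 + 1) with ht2
    set v2 : Array (List Int) := v1.setIfInBounds (k+1) (pcPath ((k+1)/2) ++ [((k+1:Nat) : Int)]) with hv2
    have t2size : t2.size = m + 1 := by rw [ht2]; simpa using t1size
    have v2size : v2.size = m + 1 := by rw [hv2]; simpa using v1size
    have rt2i : t2[k+1]! = (pcSP ((k+1)/2)).1 + 1 := by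
      rw [ht2]; exact read_set_self _ _ _ (by omega)
    have rt23 : t2[(k+1)/3]! = (pcSP ((k+1)/3)).1 := by
      rw [ht2, read_set_other _ _ _ _ hne3, rt13]
    have rv23 : v2[(k+1)/3]! = pcPath ((k+1)/3) := by
      rw [hv2, read_set_other _ _ _ _ hne3, rv13]
    have t2rest : ∀ j, j ≤ k → t2[j]! = (pcSP j).1 ∧ v2[j]! = pcPath j := by
      intro j hj
      have hjne : k + 1 ≠ j := by omega
      have := t1rest j hj
      exact ⟨by rw [ht2, read_set_other _ _ _ _ hjne, this.1],
             by rw [hv2, read_set_other _ _ _ _ hjne, this.2]⟩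
    simp only [rt2i, rt23, rv23]
    by_cases c3 : (k+1) % 3 = 0 ∧ (pcSP ((k+1)/3)).1 + 1 < (pcSP ((k+1)/2)).1 + 1
    · rw [if_pos c3]
      have hval : pcSP (k+1) = ((pcSP ((k+1)/3)).1 + 1, (k+1)/3) := by
        rw [hsp]; dsimp only; rw [if_pos c2]; dsimp only; rw [if_pos c3]
      exact invA_mk m k t2 v2 _ _ t2size v2size hk t2rest
        (by rw [hval]) (by rw [pcPath, hval])
    · rw [if_neg c3]
      have hval : pcSP (k+1) = ((pcSP ((k+1)/2)).1 + 1, (k+1)/2) := by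
        rw [hsp]; dsimp only; rw [if_pos c2]; dsimp only; rw [if_neg c3]
      exact invA_mk m k t1 v1 _ _ t1size v1size hk t1rest
        (by rw [hval]) (by rw [pcPath, hval])
  · rw [if_neg c2]
    simp only [rt1i, rt13, rv13]
    by_cases c3 : (k+1) % 3 = 0 ∧ (pcSP ((k+1)/3)).1 + 1 < (pcSP k).1 + 1
    · rw [if_pos c3]
      have hval : pcSP (k+1) = ((pcSP ((k+1)/3)).1 + 1, (k+1)/3) := by
        rw [hsp]; dsimp only; rw [if_neg c2]; dsimp only; rw [if_pos c3]
      exact invA_mk m k t1 v1 _ _ t1size v1size hk t1rest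
        (by rw [hval]) (by rw [pcPath, hval])
    · rw [if_neg c3]
      have hval : pcSP (k+1) = ((pcSP k).1 + 1, k) := by
        rw [hsp]; dsimp only; rw [if_neg c2]; dsimp only; rw [if_neg c3]
      exact invA_mk m k sv.1 sv.2 _ _ h1 h2 hk (fun j hj => h3 j (by omega) (by omega))
        (by rw [hval]) (by rw [pcPath, hval])

lemma invB_step (m k : Nat) (sp : Array Int × Array Nat)
    (hk : k < m) (h : InvB m k sp) : InvB m (k+1) (pcStepB sp (k+1)) := by
  obtain ⟨h1, h2, h3⟩ := h
  have e1 := h3 k le_rfl (le_of_lt hk)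
  have e2 := h3 ((k+1)/2) (by omega) (by omega)
  have e3 := h3 ((k+1)/3) (by omega) (by omega)
  have hs1 : k + 1 < sp.1.size := by omega
  have hs2 : k + 1 < sp.2.size := by omega
  unfold pcStepB
  dsimp only
  have hidx : k + 1 - 1 = k := by omega
  rw [hidx, e1.1, e2.1, e3.1]
  have hc : (let c : Int × Nat := ((pcSP k).1 + 1, k)
             let c := if (k+1) % 2 = 0 ∧ (pcSP ((k+1)/2)).1 + 1 < c.1 then ((pcSP ((k+1)/2)).1 + 1, (k+1)/2) else c
             if (k+1) % 3 = 0 ∧ (pcSP ((k+1)/3)).1 + 1 < c.1 then ((pcSP ((k+1)/3)).1 + 1, (k+1)/3) else c)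
            = pcSP (k+1) := by
    rw [pcSP]
  rw [hc]
  refine ⟨by simpa using h1, by simpa using h2, ?_⟩
  intro j hj hjm
  rcases eq_or_lt_of_le hj with rfl | hjk
  · exact ⟨read_set_self _ _ _ hs1, read_set_self _ _ _ hs2⟩
  · have hjne : k + 1 ≠ j := by omega
    have := h3 j (by omega) hjm
    exact ⟨by rw [read_set_other _ _ _ _ hjne, this.1],
           by rw [read_set_other _ _ _ _ hjne, this.2]⟩

lemma foldA_inv (m k : Nat) (hk : k ≤ m) :
    InvA m k ((List.range' 1 k).foldl pcStepA
      (Array.replicate (m+1) 0, Array.replicate (m+1) ([] : List Int))) := by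
  induction k with
  | zero => simpa using invA_init m
  | succ k ih =>
    have : List.range' 1 (k+1) = List.range' 1 k ++ [k + 1] := by
      simpa [Nat.add_comm] using List.range'_concat (s := 1) (n := k) (step := 1)
    rw [this, List.foldl_append]
    simp only [List.foldl_cons, List.foldl_nil]
    exact invA_step m k _ (by omega) (ih (by omega))

lemma foldB_inv (m k : Nat) (hk : k ≤ m) :
    InvB m k ((List.range' 1 k).foldl pcStepB
      (Array.replicate (m+1) 0, Array.replicate (m+1) 0)) := by
  induction k with
  | zero => simpa using invB_init m
  | succ k ih =>
    have : List.range' 1 (k+1) = List.range' 1 k ++ [k + 1] := by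
      simpa [Nat.add_comm] using List.range'_concat (s := 1) (n := k) (step := 1)
    rw [this, List.foldl_append]
    simp only [List.foldl_cons, List.foldl_nil]
    exact invB_step m k _ (by omega) (ih (by omega))

lemma collect_eq (parent : Array Nat) (m : Nat)
    (hp : ∀ j, j ≤ m → parent[j]! = (pcSP j).2) :
    ∀ fuel cur, cur ≤ m → cur < fuel → (pcCollect parent fuel cur).reverse = pcPath cur := by
  intro fuel
  induction fuel with
  | zero => intro cur _ h; omega
  | succ f ih =>
    intro cur hm hf
    cases cur with
    | zero => simp [pcCollect, pcPath]
    | succ c =>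
      rw [pcCollect]
      rw [if_pos (Nat.succ_pos c)]
      have hpc : parent[c+1]! = (pcSP (c+1)).2 := hp _ hm
      have hle : (pcSP (c+1)).2 ≤ c := pcSP_parent_le c
      rw [hpc, List.reverse_cons, ih _ (by omega) (by omega)]
      rw [pcPath]

theorem primitive_calculator_spec : Claim_equal_primitive_calculator := by
  intro n _ _
  unfold Spec_primitive_calculator primitive_calculator primitive_calculator_alt
  dsimp only
  set m := n.toNat with hm
  obtain ⟨_, _, ha⟩ := foldA_inv m m le_rfl
  obtain ⟨_, _, hb⟩ := foldB_inv m m le_rfl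
  have hA := ha m le_rfl le_rfl
  have hB := hb m le_rfl le_rfl
  rw [hA.1, hA.2, hB.1]
  rw [collect_eq _ m (fun j hj => (hb j hj hj).2) (m+1) m le_rfl (by omega)]
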